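-- pv_equiv track=rewrite | github.com/BaileyChoi/Coding_test | 프로그래머스/0/181887. 홀수 vs 짝수/홀수 vs 짝수.py | solution
-- ===== SOURCE A (Python) =====
-- def solution(num_list):
--     hol, zak = 0, 0
--
--     for i, n in enumerate(num_list):
--         if i % 2:
--             hol += n
--         else:
--             zak += n
--
--     return max(hol, zak)
-- ===== SOURCE B (Python) =====
-- def solution(num_list):
--     even_sum = sum(num_list[::2])
--     odd_sum = sum(num_list[1::2])
--     return max(even_sum, odd_sum)
-- ===== Notes on version B (the rewrite author's own statement) =====
-- stated objective: idiomatic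
-- what changed: Replaced the single indexed loop with a parity branch by two strided slices summed separately (num_list[::2] and num_list[1::2]) via C-level sum, then max of the two sums.
import Mathlib
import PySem

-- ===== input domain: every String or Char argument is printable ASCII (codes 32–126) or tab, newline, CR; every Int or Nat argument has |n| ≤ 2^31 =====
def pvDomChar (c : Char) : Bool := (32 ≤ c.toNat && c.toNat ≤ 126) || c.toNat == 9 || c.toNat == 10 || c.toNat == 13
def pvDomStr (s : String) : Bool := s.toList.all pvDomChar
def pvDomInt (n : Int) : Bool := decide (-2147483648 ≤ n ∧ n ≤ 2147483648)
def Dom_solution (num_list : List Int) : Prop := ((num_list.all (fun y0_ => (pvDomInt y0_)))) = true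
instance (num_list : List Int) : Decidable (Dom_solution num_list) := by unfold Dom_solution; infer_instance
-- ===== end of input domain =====

-- ===== PORT A =====
-- one honest line: B sums the two strided slices separately instead of one loop with a parity branch (idiomatic decomposition)
def solution (num_list : List Int) : Int :=
  let p := (PySem.List.enumerate num_list 0).foldl
    (fun (p : Int × Int) (inp : Int × Int) =>
      if inp.1 % 2 ≠ 0 then (p.1 + inp.2, p.2) else (p.1, p.2 + inp.2))
    (0, 0)
  max p.1 p.2

-- ===== PORT B =====
-- B's strided slice xs[::2]: PySem has no step slices, so it is ported by hand (exact: takes indices 0,2,4,…)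
def everyOther : List Int → List Int
  | [] => []
  | [x] => [x]
  | x :: _ :: rest => x :: everyOther rest

def solution_alt (num_list : List Int) : Int :=
  let even_sum := (everyOther num_list).sum
  let odd_sum := (everyOther num_list.tail).sum
  max even_sum odd_sum

-- ===== PRECONDITION & SPEC =====
def Spec_solution (num_list : List Int) (out : Int) : Prop := out = solution_alt num_list
instance (num_list : List Int) (out : Int) : Decidable (Spec_solution num_list out) := by unfold Spec_solution; infer_instance

-- ===== CLAIM (what is proved, stated in full; the proofs are below) =====
def Claim_equal_solution : Prop := ∀ (num_list : List Int), Dom_solution num_list → Spec_solution num_list (solution num_list)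

-- ===== LEMMAS AND PROOFS =====

theorem everyOther_cons (x : Int) (xs : List Int) :
    everyOther (x :: xs) = x :: everyOther xs.tail := by
  cases xs <;> simp [everyOther]

theorem fold_enum (xs : List Int) (s h z : Int) :
    (PySem.List.enumerate xs s).foldl
      (fun (p : Int × Int) (inp : Int × Int) =>
        if inp.1 % 2 ≠ 0 then (p.1 + inp.2, p.2) else (p.1, p.2 + inp.2))
      (h, z)
    = if s % 2 = 0 then (h + (everyOther xs.tail).sum, z + (everyOther xs).sum)
      else (h + (everyOther xs).sum, z + (everyOther xs.tail).sum) := by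
  induction xs generalizing s h z with
  | nil => simp [everyOther]
  | cons x xs ih =>
    rw [PySem.List.enumerate_cons]
    simp only [List.foldl_cons]
    by_cases hp : s % 2 = 0
    · have hp1 : ¬ (s + 1) % 2 = 0 := by omega
      simp only [hp]
      rw [ih (s+1)]
      simp [hp1, everyOther_cons]
      ring
    · have hp1 : (s + 1) % 2 = 0 := by omega
      have h1 : s % 2 = 1 := by omega
      simp only [hp]
      rw [ih (s+1)]
      simp [hp1, h1, everyOther_cons]
      ring

-- ===== VERDICT =====
theorem solution_spec : Claim_equal_solution := by
  intro nl _
  show solution nl = solution_alt nl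
  simp only [solution, solution_alt, fold_enum]
  norm_num
  omega
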